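-- pv_equiv track=rewrite | github.com/Alexander7170/Actividades_Programacion_UTN | Actividades_Programacion_UTN/pygame/configuraciones.py | get_ubicacion_tablero_imagenes
-- ===== SOURCE A (Python) =====
-- def get_ubicacion_tablero_imagenes(tablero:list)->list:
--     """
--     Funcion que obtiene las ubicacion de las imagenes del tablero
--     donde cada imagen tendra su respectiva ubicacion
--
--     Devuelve una lista anidada, donde cada sublista representa la coordenada donde se ubicara la imagen
--     """
--     ubicaciones_ordenada = []
--     sentido_derecho = True
--     sentido_izquierdo = False
--     eje_x = 120
--     eje_y = 400
--     for i in range(len(tablero)):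
--         if i % 6 == 0:
--             if i != 0:
--                 eje_y -= 78
--                 if sentido_derecho:
--                     sentido_izquierdo = True
--                     sentido_derecho = False
--                 elif sentido_izquierdo:
--                     sentido_derecho = True
--                     sentido_izquierdo = False
--         elif sentido_derecho:
--             eje_x += 115
--         elif sentido_izquierdo:
--             eje_x -= 115
--         ubicaciones_ordenada.append((eje_x,eje_y))
--
--     return ubicaciones_ordenada
-- ===== SOURCE B (Python) =====
-- def get_ubicacion_tablero_imagenes(tablero: list) -> list:
--     """Closed-form per-index coordinates: row = i//6, col = i%6 (reflected on odd rows)."""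
--     ubicaciones = []
--     for i in range(len(tablero)):
--         row, col = divmod(i, 6)
--         y = 400 - 78 * row
--         x = 120 + 115 * col if row % 2 == 0 else 120 + 115 * (5 - col)
--         ubicaciones.append((x, y))
--     return ubicaciones
-- ===== Notes on version B (the rewrite author's own statement) =====
-- stated objective: simpler
-- what changed: Replaced the stateful serpentine walk (direction flags sentido_derecho/sentido_izquierdo and running x/y accumulators) by a closed-form per-index formula: row = i//6, col = i%6, y = 400 - 78*row, x = 120 + 115*col on even rows and 120 + 115*(5-col) on odd rows.
import Mathlib
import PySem

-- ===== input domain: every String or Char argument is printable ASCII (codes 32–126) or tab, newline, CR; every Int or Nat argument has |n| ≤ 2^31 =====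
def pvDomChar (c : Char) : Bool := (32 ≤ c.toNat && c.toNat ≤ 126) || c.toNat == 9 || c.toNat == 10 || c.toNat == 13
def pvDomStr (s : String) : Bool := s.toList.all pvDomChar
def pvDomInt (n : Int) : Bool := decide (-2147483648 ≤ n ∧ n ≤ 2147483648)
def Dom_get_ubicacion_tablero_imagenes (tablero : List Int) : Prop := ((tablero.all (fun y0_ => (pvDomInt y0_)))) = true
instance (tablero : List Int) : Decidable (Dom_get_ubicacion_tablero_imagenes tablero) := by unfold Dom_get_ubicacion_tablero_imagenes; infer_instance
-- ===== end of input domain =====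

-- B replaces A's serpentine direction-flag state machine by a closed-form per-index
-- formula (row = i/6, col = i%6, reflected on odd rows); objective: simpler.

-- ===== PORT A =====
-- state: (ubicaciones_ordenada, sentido_derecho, sentido_izquierdo, eje_x, eje_y)
def pvStepA (st : List (Int × Int) × Bool × Bool × Int × Int) (i : Nat) :
    List (Int × Int) × Bool × Bool × Int × Int :=
  let (acc, sd, si, x, y) := st
  if i % 6 = 0 then
    if i ≠ 0 then
      let y' := y - 78
      if sd then (acc ++ [(x, y')], false, true, x, y')
      else if si then (acc ++ [(x, y')], true, false, x, y')
      else (acc ++ [(x, y')], sd, si, x, y')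
    else (acc ++ [(x, y)], sd, si, x, y)
  else if sd then (acc ++ [(x + 115, y)], sd, si, x + 115, y)
  else if si then (acc ++ [(x - 115, y)], sd, si, x - 115, y)
  else (acc ++ [(x, y)], sd, si, x, y)

def get_ubicacion_tablero_imagenes (tablero : List Int) : List (Int × Int) :=
  ((List.range tablero.length).foldl pvStepA ([], true, false, 120, 400)).1

-- ===== PORT B =====
def pvCoord (i : Nat) : Int × Int :=
  let row := i / 6
  let col := i % 6
  let y : Int := 400 - 78 * (row : Int)
  let x : Int := if row % 2 = 0 then 120 + 115 * (col : Int) else 120 + 115 * (5 - (col : Int))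
  (x, y)

def get_ubicacion_tablero_imagenes_alt (tablero : List Int) : List (Int × Int) :=
  (List.range tablero.length).map pvCoord

-- ===== PRECONDITION & SPEC =====
def Spec_get_ubicacion_tablero_imagenes (tablero : List Int) (out : List (Int × Int)) : Prop := out = get_ubicacion_tablero_imagenes_alt tablero
instance (tablero : List Int) (out : List (Int × Int)) : Decidable (Spec_get_ubicacion_tablero_imagenes tablero out) := by unfold Spec_get_ubicacion_tablero_imagenes; infer_instance

-- ===== CLAIM (what is proved, stated in full; the proofs are below) =====
def Claim_equal_get_ubicacion_tablero_imagenes : Prop := ∀ (tablero : List Int), Dom_get_ubicacion_tablero_imagenes tablero → Spec_get_ubicacion_tablero_imagenes tablero (get_ubicacion_tablero_imagenes tablero)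

-- ===== LEMMAS AND PROOFS =====

-- Loop invariant: after processing indices 0..n-1, A's state holds the closed-form
-- coordinates of every index so far, and flags/x/y are those of index n-1 (n-1 = 0 for n = 0).
theorem pvInvA (n : Nat) :
    (List.range n).foldl pvStepA ([], true, false, 120, 400) =
      (List.map pvCoord (List.range n),
       decide ((n - 1) / 6 % 2 = 0), decide ((n - 1) / 6 % 2 = 1),
       (pvCoord (n - 1)).1, (pvCoord (n - 1)).2) := by
  induction n with
  | zero => simp [pvCoord]
  | succ n ih =>
    rw [List.range_succ, List.foldl_append, ih, List.map_append]
    simp only [List.foldl_cons, List.foldl_nil, List.map_cons, List.map_nil]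
    clear ih
    unfold pvStepA
    by_cases h0 : n = 0
    · subst h0; simp [pvCoord]
    · by_cases h6 : n % 6 = 0 <;> by_cases he : (n - 1) / 6 % 2 = 0 <;>
      · simp [h6, h0, he, pvCoord]
        split_ifs <;> simp_all <;> omega

-- ===== VERDICT (by name: the statement is the Claim_ definition above) =====
theorem get_ubicacion_tablero_imagenes_spec : Claim_equal_get_ubicacion_tablero_imagenes := by
  intro tablero _
  unfold Spec_get_ubicacion_tablero_imagenes get_ubicacion_tablero_imagenes
    get_ubicacion_tablero_imagenes_alt
  rw [pvInvA]
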